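-- pv_equiv track=rewrite | github.com/yerupt/NoiseNER | data/build_datasets.py | get_categories_in_sentence
-- ===== SOURCE A (Python) =====
-- TARGET_CATEGORIES = ['TIME', 'IDTY', 'APT', 'MAL', 'TOOL']
--
-- def get_categories_in_sentence(sentence):
--     """检测一个句子中包含了哪些目标实体类别"""
--     found_cats = set()
--     for line in sentence.split('\n'):
--         parts = line.strip().split()
--         if len(parts) >= 2:
--             label = parts[-1]
--             for cat in TARGET_CATEGORIES:
--                 if cat in label:
--                     found_cats.add(cat)
--     return found_cats
-- ===== SOURCE B (Python) =====
-- TARGET_CATEGORIES = ['TIME', 'IDTY', 'APT', 'MAL', 'TOOL']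
--
-- def get_categories_in_sentence(sentence):
--     """检测一个句子中包含了哪些目标实体类别"""
--     # Worklist algorithm: keep a shrinking list of not-yet-found categories;
--     # a category found in some label is emitted once and never tested again.
--     remaining = list(TARGET_CATEGORIES)
--     found = []
--     for line in sentence.split('\n'):
--         if not remaining:
--             break
--         parts = line.strip().split()
--         if len(parts) >= 2:
--             label = parts[-1]
--             still = []
--             for cat in remaining:
--                 if cat in label:
--                     found.append(cat)
--                 else:
--                     still.append(cat)
--             remaining = still
--     return set(found)
-- ===== Notes on version B (the rewrite author's own statement) =====
-- stated objective: alternative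
-- what changed: Replaces A's grow-a-set over a nested lines-by-categories scan with a shrinking worklist: B keeps a list of not-yet-found categories, moves each matched category to the result exactly once (never retesting it) and breaks out early once all five are found, so no set-based deduplication happens at all.
import Mathlib
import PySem

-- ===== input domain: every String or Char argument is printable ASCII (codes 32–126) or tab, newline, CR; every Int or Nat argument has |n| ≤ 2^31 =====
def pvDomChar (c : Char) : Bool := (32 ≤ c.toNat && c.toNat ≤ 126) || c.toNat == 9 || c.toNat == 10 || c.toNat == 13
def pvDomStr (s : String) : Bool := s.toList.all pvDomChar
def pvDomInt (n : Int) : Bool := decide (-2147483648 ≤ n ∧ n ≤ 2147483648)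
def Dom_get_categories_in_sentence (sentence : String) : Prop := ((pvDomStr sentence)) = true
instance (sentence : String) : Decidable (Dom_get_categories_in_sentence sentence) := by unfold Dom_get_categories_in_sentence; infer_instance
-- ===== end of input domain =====

-- B replaces A's grow-a-set nested scan by a shrinking worklist of not-yet-found categories: each category is emitted once and never retested (early exit when the worklist empties); same result, no set deduplication.

def TARGET_CATEGORIES : List String := ["TIME", "IDTY", "APT", "MAL", "TOOL"]

-- ===== PORT A =====
-- the body of A's per-line loop ('parts = line.strip().split(); if len(parts) >= 2: for cat in TARGET_CATEGORIES: if cat in label: found_cats.add(cat)')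
def pvStepA (found_cats : PySem.Set String) (line : String) : PySem.Set String :=
  let parts := PySem.Str.split₀ (PySem.Str.strip line)
  if 2 ≤ parts.length then
    TARGET_CATEGORIES.foldl (fun fc cat =>
      if PySem.Str.isIn cat (PySem.List.pyGetD parts (-1) "") then PySem.Set.add fc cat
      else fc) found_cats
  else found_cats

-- sentence.split('\n'): split? is none only for sep = "", so .getD [] is exact here
def get_categories_in_sentence (sentence : String) : List String :=
  ((PySem.Str.split? sentence "\n").getD []).foldl pvStepA []

-- ===== PORT B =====
-- B's per-line step on state (remaining, found); the 'if not remaining: break' is ported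
-- as the state-preserving guard (after the worklist empties every later iteration is a no-op);
-- 'label = parts[-1]' is inlined
def pvStepB (st : List String × List String) (line : String) : List String × List String :=
  if st.1.isEmpty then st
  else if 2 ≤ (PySem.Str.split₀ (PySem.Str.strip line)).length then
    -- still = []; for cat in remaining: found.append(cat) / still.append(cat)
    st.1.foldl (fun acc cat =>
      if PySem.Str.isIn cat (PySem.List.pyGetD (PySem.Str.split₀ (PySem.Str.strip line)) (-1) "")
      then (acc.1, acc.2 ++ [cat])
      else (acc.1 ++ [cat], acc.2)) ([], st.2)
  else st

def get_categories_in_sentence_alt (sentence : String) : List String :=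
  PySem.Set.ofList
    ((((PySem.Str.split? sentence "\n").getD []).foldl pvStepB (TARGET_CATEGORIES, [])).2)

-- ===== PRECONDITION & SPEC =====
def Spec_get_categories_in_sentence (sentence : String) (out : List String) : Prop := out = get_categories_in_sentence_alt sentence
instance (sentence : String) (out : List String) : Decidable (Spec_get_categories_in_sentence sentence out) := by unfold Spec_get_categories_in_sentence; infer_instance

-- ===== CLAIM (what is proved, stated in full; the proofs are below) =====
def Claim_equal_get_categories_in_sentence : Prop := ∀ (sentence : String), Dom_get_categories_in_sentence sentence → Spec_get_categories_in_sentence sentence (get_categories_in_sentence sentence)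

-- ===== LEMMAS AND PROOFS =====

-- per-line hits, the common value both sides are about
def pvHits (line : String) : List String :=
  if 2 ≤ (PySem.Str.split₀ (PySem.Str.strip line)).length then
    TARGET_CATEGORIES.filter
      (fun cat => PySem.Str.isIn cat (PySem.List.pyGetD (PySem.Str.split₀ (PySem.Str.strip line)) (-1) ""))
  else []

-- ---- A side: the fold accumulates Set.update by the concatenated hits ----

theorem foldl_add_if_eq_update_filter (l : List String) (p : String → Bool)
    (s : PySem.Set String) :
    l.foldl (fun fc cat => if p cat then PySem.Set.add fc cat else fc) s
      = PySem.Set.update s (l.filter p) := by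
  induction l generalizing s with
  | nil => rfl
  | cons x xs ih =>
    rw [List.foldl_cons, List.filter_cons]
    by_cases h : p x
    · rw [if_pos h, if_pos h, ih]; rfl
    · rw [if_neg h, if_neg (by simp [h]), ih]

theorem stepA_eq_update (s : PySem.Set String) (line : String) :
    pvStepA s line = PySem.Set.update s (pvHits line) := by
  unfold pvStepA pvHits
  by_cases h : 2 ≤ (PySem.Str.split₀ (PySem.Str.strip line)).length
  · rw [if_pos h, if_pos h, foldl_add_if_eq_update_filter]
  · rw [if_neg h, if_neg h]; rfl

theorem foldA_eq_update_flatMap (lines : List String) (s : PySem.Set String) :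
    lines.foldl pvStepA s = PySem.Set.update s (lines.flatMap pvHits) := by
  induction lines generalizing s with
  | nil => rw [List.foldl_nil, List.flatMap_nil]; rfl
  | cons line rest ih =>
    rw [List.foldl_cons, List.flatMap_cons, ih, stepA_eq_update, PySem.Set.update_append]

-- ---- B side: the worklist fold maintains the invariant (TARGET \ found, found) ----

-- the inner worklist loop splits 'remaining' by the predicate, appending
theorem foldl_split (r p f : List String) (q : String → Bool) :
    r.foldl (fun (acc : List String × List String) cat =>
        if q cat then (acc.1, acc.2 ++ [cat]) else (acc.1 ++ [cat], acc.2)) (p, f)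
      = (p ++ r.filter (fun c => !(q c)), f ++ r.filter q) := by
  induction r generalizing p f with
  | nil => simp
  | cons x xs ih =>
    rw [List.foldl_cons, List.filter_cons, List.filter_cons]
    by_cases h : q x
    · rw [if_pos h, ih]; simp [h]
    · rw [if_neg h, ih]; simp [h]

theorem contains_update (f l : List String) (c : String) :
    List.contains (PySem.Set.update f l) c = (List.contains f c || List.contains l c) := by
  by_cases hf : c ∈ f <;> by_cases hl : c ∈ l <;>
    simp [hf, hl, List.contains_eq_mem, PySem.Set.mem_update]

theorem update_of_subset (f l : List String) (h : ∀ x ∈ l, x ∈ f) :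
    PySem.Set.update f l = f := by
  induction l generalizing f with
  | nil => rfl
  | cons x xs ih =>
    rw [PySem.Set.update_cons, PySem.Set.add_of_mem (h x (by simp))]
    exact ih f (fun y hy => h y (by simp [hy]))

theorem hits_subset_target (line : String) : ∀ x ∈ pvHits line, x ∈ TARGET_CATEGORIES := by
  unfold pvHits
  intro x hx
  split at hx
  · exact (List.mem_filter.mp hx).1
  · exact absurd hx (List.not_mem_nil)

-- 'remaining' component: filtering the not-yet-found targets by ¬q equals the targets not in the updated found-set
theorem remaining_component (t f : List String) (q : String → Bool) :
    (t.filter (fun c => !(List.contains f c))).filter (fun c => !(q c))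
      = t.filter (fun c => !(List.contains (PySem.Set.update f (t.filter q)) c)) := by
  rw [List.filter_filter]
  refine List.filter_congr ?_
  intro c hc
  rw [contains_update]
  by_cases h1 : c ∈ f <;> by_cases h2 : q c <;>
    simp [h1, h2, List.contains_eq_mem, List.mem_filter, hc]

-- 'found' component: appending the newly matched candidates equals Set.update by this line's hits
theorem found_component (t f : List String) (q : String → Bool) (ht : t.Nodup) :
    f ++ (t.filter (fun c => !(List.contains f c))).filter q
      = PySem.Set.update f (t.filter q) := by
  rw [PySem.Set.update_eq_append_filter,
      PySem.Set.ofList_eq_self_of_nodup _ (List.Nodup.filter q ht),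
      List.filter_filter, List.filter_filter]
  refine congrArg (f ++ ·) (List.filter_congr ?_)
  intro c _
  simp only [PySem.Set.contains_eq_listContains, Bool.and_comm]

-- the per-line step preserves the invariant
theorem stepB_invariant (f : List String) (line : String) :
    pvStepB (TARGET_CATEGORIES.filter (fun c => !(List.contains f c)), f) line
      = (TARGET_CATEGORIES.filter
            (fun c => !(List.contains (PySem.Set.update f (pvHits line)) c)),
         PySem.Set.update f (pvHits line)) := by
  unfold pvStepB
  by_cases hemp : (TARGET_CATEGORIES.filter (fun c => !(List.contains f c))).isEmpty
  · -- worklist empty: every target is already in found, so the update is a no-op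
    have hall : ∀ x ∈ pvHits line, x ∈ f := by
      intro x hx
      have hxT := hits_subset_target line x hx
      by_contra hxf
      have hmem : x ∈ TARGET_CATEGORIES.filter (fun c => !(List.contains f c)) :=
        List.mem_filter.mpr ⟨hxT, by simp [List.contains_eq_mem, hxf]⟩
      rw [List.isEmpty_iff.mp hemp] at hmem
      exact absurd hmem (List.not_mem_nil)
    rw [if_pos hemp, update_of_subset f (pvHits line) hall]
  · rw [if_neg hemp]
    by_cases hlen : 2 ≤ (PySem.Str.split₀ (PySem.Str.strip line)).length
    · rw [if_pos hlen, foldl_split]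
      have hhits : pvHits line
          = TARGET_CATEGORIES.filter
              (fun cat => PySem.Str.isIn cat (PySem.List.pyGetD (PySem.Str.split₀ (PySem.Str.strip line)) (-1) "")) := by
        unfold pvHits; rw [if_pos hlen]
      rw [hhits, List.nil_append,
          remaining_component TARGET_CATEGORIES f _,
          found_component TARGET_CATEGORIES f _ (by decide)]
    · rw [if_neg hlen]
      have h0 : pvHits line = [] := by unfold pvHits; rw [if_neg hlen]
      rw [h0]; rfl

theorem foldB_invariant (lines : List String) (f : List String) :
    lines.foldl pvStepB (TARGET_CATEGORIES.filter (fun c => !(List.contains f c)), f)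
      = (TARGET_CATEGORIES.filter
            (fun c => !(List.contains (PySem.Set.update f (lines.flatMap pvHits)) c)),
         PySem.Set.update f (lines.flatMap pvHits)) := by
  induction lines generalizing f with
  | nil => rw [List.foldl_nil, List.flatMap_nil]; rfl
  | cons line rest ih =>
    rw [List.foldl_cons, stepB_invariant, ih, List.flatMap_cons, PySem.Set.update_append]

-- ===== VERDICT (by name: the statement is the Claim_ definition above) =====
theorem get_categories_in_sentence_spec : Claim_equal_get_categories_in_sentence := by
  intro sentence _
  unfold Spec_get_categories_in_sentence get_categories_in_sentence get_categories_in_sentence_alt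
  rw [foldA_eq_update_flatMap,
      show (TARGET_CATEGORIES, ([] : List String))
          = (TARGET_CATEGORIES.filter (fun c => !(List.contains ([] : List String) c)), []) from rfl,
      foldB_invariant, PySem.Set.update_nil_left]
  exact (PySem.Set.ofList_ofList _).symm
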